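-- pv_equiv track=rewrite | github.com/anthonytk31415/python-data-structures-and-algorithms | problems/trees.py/minIncrements.py | helper
-- ===== SOURCE A (Python) =====
-- def leftChild(i):
--     return 2*i + 1
--
-- def rightChild(i):
--     return 2*i + 2
--
-- def helper(i, cost, totalIncrements):
--     leftIdx, rightIdx = leftChild(i), rightChild(i)
--     if min(leftIdx, rightIdx) >= len(cost):
--         return cost[i]
--     leftMax, rightMax = helper(leftIdx, cost, totalIncrements), helper(rightIdx, cost, totalIncrements)
--     childMax , childMin = max(leftMax, rightMax), min(leftMax, rightMax)
--     totalIncrements[0] += abs(childMax - childMin)          # delta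
--     return cost[i] + childMax                               # maxPath
-- ===== SOURCE B (Python) =====
-- def helper(i, cost, totalIncrements):
--     n = len(cost)
--     maxPath = {}
--     stack = [i]
--     while stack:
--         node = stack.pop()
--         l, r = 2 * node + 1, 2 * node + 2
--         if l >= n:
--             maxPath[node] = cost[node]
--         elif l in maxPath and r in maxPath:
--             lm, rm = maxPath[l], maxPath[r]
--             totalIncrements[0] += abs(lm - rm)
--             maxPath[node] = cost[node] + max(lm, rm)
--         else:
--             stack.extend([node, r, l])
--     return maxPath[i]
-- ===== Notes on version B (the rewrite author's own statement) =====
-- stated objective: alternative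
-- what changed: Replaced the recursive tree walk by an explicit-stack post-order DFS that maintains a dict from node index to its computed max path-sum and resolves a node once both children are in the dict.
import Mathlib
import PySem

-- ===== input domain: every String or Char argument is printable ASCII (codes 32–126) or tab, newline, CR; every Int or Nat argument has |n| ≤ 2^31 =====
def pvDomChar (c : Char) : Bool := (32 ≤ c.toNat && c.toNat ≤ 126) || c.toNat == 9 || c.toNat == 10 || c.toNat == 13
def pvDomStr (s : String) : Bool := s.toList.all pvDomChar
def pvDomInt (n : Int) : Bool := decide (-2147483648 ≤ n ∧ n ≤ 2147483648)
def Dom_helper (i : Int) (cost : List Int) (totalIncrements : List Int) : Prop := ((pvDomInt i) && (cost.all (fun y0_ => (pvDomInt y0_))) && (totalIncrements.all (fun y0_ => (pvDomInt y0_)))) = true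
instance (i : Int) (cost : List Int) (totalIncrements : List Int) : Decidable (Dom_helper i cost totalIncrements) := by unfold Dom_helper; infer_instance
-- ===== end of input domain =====

-- B replaces the recursion by an explicit-stack post-order DFS with a dict of resolved
-- subtree max path-sums (alternative decomposition, same cost). Both Pythons additionally
-- mutate totalIncrements[0] identically; the equivalence proved here is about the RETURN value.

-- ===== PORT A =====
def leftChild (i : Int) : Int := 2 * i + 1

def rightChild (i : Int) : Int := 2 * i + 2

def helper (i : Int) (cost : List Int) (totalIncrements : List Int) : Int :=
  -- totality guard: for i < 0 the Python recurses forever (outside Pre_helper)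
  if h0 : i < 0 then 0
  else
    if hc : min (leftChild i) (rightChild i) ≥ (cost.length : Int) then
      (PySem.List.pyGet? cost i).getD 0
    else
      let leftMax := helper (leftChild i) cost totalIncrements
      let rightMax := helper (rightChild i) cost totalIncrements
      -- totalIncrements[0] += abs(...) : mutation of the argument, no effect on the return value
      (PySem.List.pyGet? cost i).getD 0 + max leftMax rightMax
termination_by ((cost.length : Int) - i).toNat
decreasing_by
  · simp only [leftChild, rightChild, ge_iff_le, not_le] at hc ⊢; omega
  · simp only [leftChild, rightChild, ge_iff_le, not_le] at hc ⊢; omega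

-- ===== PORT B =====
-- fuel bound for the while loop: 1 pop for a leaf, 2 pops for an internal node (totality device)
def bFuel (n j : Nat) : Nat :=
  if n ≤ 2 * j + 1 then 1 else 2 + bFuel n (2 * j + 1) + bFuel n (2 * j + 2)
termination_by n - j
decreasing_by
  · omega
  · omega

-- the while loop of Source B: pop node; leaf → record cost[node]; both children resolved →
-- record cost[node] + max; otherwise push node back under its two children
def loopB (cost : List Int) : Nat → List Int → PySem.Dict Int Int → PySem.Dict Int Int
  | 0, _, m => m
  | _ + 1, [], m => m
  | f + 1, node :: rest, m =>
    if 2 * node + 1 ≥ (cost.length : Int) then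
      loopB cost f rest (m.insert node ((PySem.List.pyGet? cost node).getD 0))
    else
      match m.get? (2 * node + 1), m.get? (2 * node + 2) with
      | some lm, some rm =>
          loopB cost f rest (m.insert node ((PySem.List.pyGet? cost node).getD 0 + max lm rm))
      | _, _ => loopB cost f ((2 * node + 1) :: (2 * node + 2) :: node :: rest) m

def helper_alt (i : Int) (cost : List Int) (totalIncrements : List Int) : Int :=
  -- fuel: enough loop iterations for the DFS (totality device; for i < 0 the Python loops forever)
  let fuel := if 0 ≤ i then bFuel cost.length i.toNat + 1 else 0
  ((loopB cost fuel [(i : Int)] PySem.Dict.empty).get? i).getD 0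

-- ===== PRECONDITION & SPEC =====
-- inSub i j: node j lies in the subtree rooted at i (climb the parent chain)
def inSub (i j : Nat) : Bool :=
  if j < i then false else if j = i then true else inSub i ((j - 1) / 2)
termination_by j
decreasing_by omega

-- Pre_helper is exactly where Python A returns: 0 ≤ i < len(cost), no node of the subtree of i
-- has a left child but no right child (else IndexError; possible only for even len at node
-- (len-2)/2), and totalIncrements nonempty when the root is internal (else IndexError).
def Pre_helper (i : Int) (cost : List Int) (totalIncrements : List Int) : Prop :=
  0 ≤ i ∧ i < cost.length ∧
  (cost.length % 2 = 0 → inSub i.toNat ((cost.length - 2) / 2) = false) ∧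
  (2 * i + 1 < cost.length → totalIncrements ≠ [])

instance (i : Int) (cost : List Int) (totalIncrements : List Int) : Decidable (Pre_helper i cost totalIncrements) := by
  unfold Pre_helper; infer_instance

def pvWitness_helper : Int × List Int × List Int := (0, [1, 5, 2], [0])

def Spec_helper (i : Int) (cost : List Int) (totalIncrements : List Int) (out : Int) : Prop := out = helper_alt i cost totalIncrements
instance (i : Int) (cost : List Int) (totalIncrements : List Int) (out : Int) : Decidable (Spec_helper i cost totalIncrements out) := by unfold Spec_helper; infer_instance

-- ===== CLAIM (what is proved, stated in full; the proofs are below) =====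
def Claim_equal_helper : Prop := ∀ (i : Int) (cost : List Int) (totalIncrements : List Int), Dom_helper i cost totalIncrements → Pre_helper i cost totalIncrements → Spec_helper i cost totalIncrements (helper i cost totalIncrements)

-- ===== LEMMAS AND PROOFS =====

-- the subtree of j is index-valid: every leaf-case node reached is < n
def GoodT (n j : Nat) : Prop :=
  if n ≤ 2 * j + 1 then j < n else GoodT n (2 * j + 1) ∧ GoodT n (2 * j + 2)
termination_by n - j
decreasing_by
  · omega
  · omega

theorem inSub_self (i : Nat) : inSub i i = true := by
  rw [inSub]; simp

theorem inSub_le {i j : Nat} (h : inSub i j = true) : i ≤ j := by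
  induction j using Nat.strong_induction_on with
  | _ j ih =>
    rw [inSub] at h
    split at h
    · exact absurd h (by simp)
    · split at h
      · omega
      · have := ih ((j - 1) / 2) (by omega) h; omega

theorem inSub_child_l (j : Nat) : inSub j (2 * j + 1) = true := by
  rw [inSub]
  have h1 : ¬ (2 * j + 1 < j) := by omega
  have h2 : ¬ (2 * j + 1 = j) := by omega
  simp only [h1, h2, if_false]
  have : (2 * j + 1 - 1) / 2 = j := by omega
  rw [this, inSub_self]

theorem inSub_child_r (j : Nat) : inSub j (2 * j + 2) = true := by
  rw [inSub]
  have h1 : ¬ (2 * j + 2 < j) := by omega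
  have h2 : ¬ (2 * j + 2 = j) := by omega
  simp only [h1, h2, if_false]
  have : (2 * j + 2 - 1) / 2 = j := by omega
  rw [this, inSub_self]

theorem inSub_trans {a b c : Nat} (hab : inSub a b = true) (hbc : inSub b c = true) :
    inSub a c = true := by
  induction c using Nat.strong_induction_on with
  | _ c ih =>
    rw [inSub] at hbc
    by_cases h1 : c < b
    · rw [if_pos h1] at hbc; exact absurd hbc (by simp)
    · by_cases h2 : c = b
      · subst h2; exact hab
      · rw [if_neg h1, if_neg h2] at hbc
        have hb : a ≤ b := inSub_le hab
        rw [inSub, if_neg (show ¬ (c < a) by omega), if_neg (show ¬ (c = a) by omega)]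
        exact ih ((c - 1) / 2) (by omega) hbc

theorem sib_disjoint (j : Nat) : ∀ k, inSub (2 * j + 1) k = true → inSub (2 * j + 2) k = true → False := by
  intro k
  induction k using Nat.strong_induction_on with
  | _ k ih =>
    intro h1 h2
    rcases Nat.lt_or_ge k (2 * j + 1) with hk | hk
    · rw [inSub, if_pos hk] at h1; exact absurd h1 (by simp)
    · rcases eq_or_ne k (2 * j + 1) with he | he
      · subst he
        rw [inSub, if_pos (by omega)] at h2; exact absurd h2 (by simp)
      · rcases eq_or_ne k (2 * j + 2) with he2 | he2
        · subst he2
          rw [inSub, if_neg (by omega), if_neg he] at h1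
          rw [show (2 * j + 2 - 1) / 2 = j from by omega] at h1
          have := inSub_le h1; omega
        · rw [inSub, if_neg (by omega), if_neg he] at h1
          rw [inSub, if_neg (by omega), if_neg he2] at h2
          exact ih ((k - 1) / 2) (by omega) h1 h2


theorem goodT_lt {n j : Nat} (h : GoodT n j) : j < n := by
  by_cases hl : n ≤ 2 * j + 1
  · rw [GoodT, if_pos hl] at h; exact h
  · omega

theorem pre_good (n : Nat) : ∀ (fm j : Nat), n - j ≤ fm → j < n →
    (n % 2 = 0 → inSub j ((n - 2) / 2) = false) → GoodT n j := by
  intro fm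
  induction fm with
  | zero => intro j h hj _; omega
  | succ fm ih =>
    intro j h hj hbad
    rw [GoodT]
    by_cases hleaf : n ≤ 2 * j + 1
    · rw [if_pos hleaf]; exact hj
    · rw [if_neg hleaf]
      have h22 : 2 * j + 2 ≠ n := by
        intro he
        have hev : n % 2 = 0 := by omega
        have hj2 : (n - 2) / 2 = j := by omega
        have hb := hbad hev
        rw [hj2, inSub_self] at hb
        exact absurd hb (by simp)
      refine ⟨ih (2 * j + 1) (by omega) (by omega) ?_, ih (2 * j + 2) (by omega) (by omega) ?_⟩
      · intro hev
        by_contra hcon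
        have ht : inSub (2 * j + 1) ((n - 2) / 2) = true := by
          revert hcon; cases inSub (2 * j + 1) ((n - 2) / 2) <;> simp
        have := inSub_trans (inSub_child_l j) ht
        rw [hbad hev] at this; exact absurd this (by simp)
      · intro hev
        by_contra hcon
        have ht : inSub (2 * j + 2) ((n - 2) / 2) = true := by
          revert hcon; cases inSub (2 * j + 2) ((n - 2) / 2) <;> simp
        have := inSub_trans (inSub_child_r j) ht
        rw [hbad hev] at this; exact absurd this (by simp)

theorem helper_leaf (cost tot : List Int) (j : Nat) (h : cost.length ≤ 2 * j + 1) :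
    helper (j : Int) cost tot = (PySem.List.pyGet? cost (j : Int)).getD 0 := by
  rw [helper, dif_neg (show ¬ ((j : Int) < 0) by omega), dif_pos]
  simp only [leftChild, rightChild]
  omega

theorem helper_node (cost tot : List Int) (j : Nat) (h : 2 * j + 1 < cost.length) :
    helper (j : Int) cost tot = (PySem.List.pyGet? cost (j : Int)).getD 0 +
      max (helper ((2 * j + 1 : Nat) : Int) cost tot) (helper ((2 * j + 2 : Nat) : Int) cost tot) := by
  rw [helper, dif_neg (show ¬ ((j : Int) < 0) by omega), dif_neg]
  · have hcl : ((2 * j + 1 : Nat) : Int) = leftChild (j : Int) := by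
      simp only [leftChild]; push_cast; ring
    have hcr : ((2 * j + 2 : Nat) : Int) = rightChild (j : Int) := by
      simp only [rightChild]; push_cast; ring
    rw [hcl, hcr]
  · simp only [leftChild, rightChild]
    omega

theorem loop_run (cost tot : List Int) : ∀ (fm j : Nat), cost.length - j ≤ fm →
    ∀ (f : Nat) (rest : List Int) (m : PySem.Dict Int Int),
    GoodT cost.length j →
    (∀ k v, m.get? k = some v → v = helper k cost tot) →
    (∀ k : Nat, inSub j k = true → m.get? (k : Int) = none) →
    ∃ m', loopB cost (bFuel cost.length j + f) ((j : Int) :: rest) m = loopB cost f rest m'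
      ∧ (∀ k v, m'.get? k = some v → v = helper k cost tot)
      ∧ m'.get? (j : Int) = some (helper (j : Int) cost tot)
      ∧ (∀ k : Int, m'.get? k = m.get? k ∨ ∃ kn : Nat, k = (kn : Int) ∧ inSub j kn = true) := by
  intro fm
  induction fm with
  | zero =>
    intro j h _ _ _ hG _ _
    have := goodT_lt hG; omega
  | succ fm ih =>
    intro j h f rest m hG hInv hFresh
    have hcl : ((2 * j + 1 : Nat) : Int) = 2 * (j : Int) + 1 := by push_cast; ring
    have hcr : ((2 * j + 2 : Nat) : Int) = 2 * (j : Int) + 2 := by push_cast; ring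
    by_cases hleaf : cost.length ≤ 2 * j + 1
    · -- leaf: one pop, record cost[j]
      have hb : bFuel cost.length j = 1 := by rw [bFuel, if_pos hleaf]
      rw [hb, show 1 + f = f + 1 from by omega]
      simp only [loopB]
      rw [if_pos (show 2 * (j : Int) + 1 ≥ (cost.length : Int) by omega)]
      refine ⟨m.insert (j : Int) ((PySem.List.pyGet? cost (j : Int)).getD 0), rfl, ?_, ?_, ?_⟩
      · intro k v hk
        rw [PySem.Dict.get?_insert] at hk
        split at hk
        · rename_i hkj; rw [hkj]
          rw [helper_leaf cost tot j hleaf]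
          exact (Option.some_injective _ hk).symm
        · exact hInv k v hk
      · rw [PySem.Dict.get?_insert_self, helper_leaf cost tot j hleaf]
      · intro k
        by_cases hk : k = (j : Int)
        · exact Or.inr ⟨j, hk, inSub_self j⟩
        · exact Or.inl (PySem.Dict.get?_insert_of_ne m _ hk)
    · -- internal: pop j, push l r j; resolve children subtrees, then resolve j
      have hnode : 2 * j + 1 < cost.length := by omega
      have hb : bFuel cost.length j = 2 + bFuel cost.length (2 * j + 1) + bFuel cost.length (2 * j + 2) := by
        rw [bFuel, if_neg hleaf]
      rw [hb, show 2 + bFuel cost.length (2 * j + 1) + bFuel cost.length (2 * j + 2) + f =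
          (bFuel cost.length (2 * j + 1) + (bFuel cost.length (2 * j + 2) + (1 + f))) + 1 from by omega]
      simp only [loopB]
      rw [if_neg (show ¬ (2 * (j : Int) + 1 ≥ (cost.length : Int)) by omega)]
      have hfl : m.get? (2 * (j : Int) + 1) = none := by
        rw [← hcl]; exact hFresh (2 * j + 1) (inSub_child_l j)
      have hfr : m.get? (2 * (j : Int) + 2) = none := by
        rw [← hcr]; exact hFresh (2 * j + 2) (inSub_child_r j)
      rw [hfl, hfr]
      -- left subtree
      obtain ⟨m1, e1, hInv1, hget1, hpres1⟩ :=
        ih (2 * j + 1) (by omega) (bFuel cost.length (2 * j + 2) + (1 + f))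
          ((2 * (j : Int) + 2) :: (j : Int) :: rest) m
          (by rw [GoodT, if_neg hleaf] at hG; exact hG.1)
          hInv
          (by intro k hk; exact hFresh k (inSub_trans (inSub_child_l j) hk))
      rw [hcl] at e1
      rw [e1]
      -- right subtree
      obtain ⟨m2, e2, hInv2, hget2, hpres2⟩ :=
        ih (2 * j + 2) (by omega) (1 + f) ((j : Int) :: rest) m1
          (by rw [GoodT, if_neg hleaf] at hG; exact hG.2)
          hInv1
          (by
            intro k hk
            rcases hpres1 (k : Int) with he | ⟨kn, hkeq, hkin⟩
            · rw [he]; exact hFresh k (inSub_trans (inSub_child_r j) hk)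
            · have : k = kn := by omega
              subst this
              exact (sib_disjoint j k hkin hk).elim)
      rw [hcr] at e2
      rw [e2, show 1 + f = f + 1 from by omega]
      simp only [loopB]
      rw [if_neg (show ¬ (2 * (j : Int) + 1 ≥ (cost.length : Int)) by omega)]
      have hl2 : m2.get? (2 * (j : Int) + 1) = some (helper ((2 * j + 1 : Nat) : Int) cost tot) := by
        rcases hpres2 (2 * (j : Int) + 1) with he | ⟨kn, hkeq, hkin⟩
        · rw [he, ← hcl]; exact hget1
        · have : kn = 2 * j + 1 := by omega
          subst this
          have := inSub_le hkin; omega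
      have hr2 : m2.get? (2 * (j : Int) + 2) = some (helper ((2 * j + 2 : Nat) : Int) cost tot) := by
        rw [← hcr]; exact hget2
      rw [hl2, hr2]
      refine ⟨m2.insert (j : Int) (helper (j : Int) cost tot), ?_, ?_, ?_, ?_⟩
      · rw [helper_node cost tot j hnode]
      · intro k v hk
        rw [PySem.Dict.get?_insert] at hk
        split at hk
        · rename_i hkj; rw [hkj]; exact (Option.some_injective _ hk).symm
        · exact hInv2 k v hk
      · rw [PySem.Dict.get?_insert_self]
      · intro k
        by_cases hk : k = (j : Int)
        · exact Or.inr ⟨j, hk, inSub_self j⟩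
        · rw [PySem.Dict.get?_insert_of_ne m2 _ hk]
          rcases hpres2 k with he2 | ⟨kn, hkeq, hkin⟩
          · rw [he2]
            rcases hpres1 k with he1 | ⟨kn, hkeq, hkin⟩
            · exact Or.inl he1
            · exact Or.inr ⟨kn, hkeq, inSub_trans (inSub_child_l j) hkin⟩
          · exact Or.inr ⟨kn, hkeq, inSub_trans (inSub_child_r j) hkin⟩

theorem helper_spec : Claim_equal_helper := by
  intro i cost tot _ hpre
  obtain ⟨hi0, hin, hbad, _⟩ := hpre
  have hij : ((i.toNat : Nat) : Int) = i := Int.toNat_of_nonneg hi0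
  have hG : GoodT cost.length i.toNat :=
    pre_good cost.length cost.length i.toNat (by omega) (by omega) hbad
  obtain ⟨m', e, _, hget, _⟩ :=
    loop_run cost tot cost.length i.toNat (by omega) 1 [] PySem.Dict.empty hG
      (by intro k v hk; rw [PySem.Dict.get?_empty] at hk; exact absurd hk (by simp))
      (by intro k _; exact PySem.Dict.get?_empty _)
  show helper i cost tot = helper_alt i cost tot
  rw [hij] at e hget
  simp only [helper_alt]
  rw [if_pos hi0, e]
  have : loopB cost 1 [] m' = m' := rfl
  rw [this, hget]
  rfl
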